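-- pv_equiv track=rewrite | github.com/Niklasvdm/2021WV_ESystant | Database_Functions.py | groupByUserAndGrades
-- ===== SOURCE A (Python) =====
-- def groupByUserAndGrades(results_from_query):
--     data_user_base = {}
--     grades_user_base = {}
--     for entry in results_from_query:
--         if entry[0] in data_user_base:
--             templist = list(entry[1:-2])
--             secondtemplist = data_user_base[entry[0]]
--             secondtemplist.append(templist)
--         else:
--             data_user_base[entry[0]] = [list(entry[1:-2])]
--             grades_user_base[entry[0]] = list(entry[-2:])
--
--     return (data_user_base, grades_user_base)
-- ===== SOURCE B (Python) =====
-- def groupByUserAndGrades(results_from_query):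
--     # Pass 1: group the full rows by user, in first-encounter order.
--     groups = {}
--     for entry in results_from_query:
--         groups.setdefault(entry[0], []).append(entry)
--     # Pass 2: derive both result dicts from the grouping.
--     data_user_base = {user: [list(row[1:-2]) for row in rows]
--                       for user, rows in groups.items()}
--     grades_user_base = {user: list(rows[0][-2:])
--                         for user, rows in groups.items()}
--     return (data_user_base, grades_user_base)
-- ===== Notes on version B (the rewrite author's own statement) =====
-- stated objective: alternative
-- what changed: A fills both result dicts in one interleaved loop with an in-place membership branch; B first builds one grouping dict of full rows per user, then derives the data dict and the grades dict from it in a second pass.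
import Mathlib
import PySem

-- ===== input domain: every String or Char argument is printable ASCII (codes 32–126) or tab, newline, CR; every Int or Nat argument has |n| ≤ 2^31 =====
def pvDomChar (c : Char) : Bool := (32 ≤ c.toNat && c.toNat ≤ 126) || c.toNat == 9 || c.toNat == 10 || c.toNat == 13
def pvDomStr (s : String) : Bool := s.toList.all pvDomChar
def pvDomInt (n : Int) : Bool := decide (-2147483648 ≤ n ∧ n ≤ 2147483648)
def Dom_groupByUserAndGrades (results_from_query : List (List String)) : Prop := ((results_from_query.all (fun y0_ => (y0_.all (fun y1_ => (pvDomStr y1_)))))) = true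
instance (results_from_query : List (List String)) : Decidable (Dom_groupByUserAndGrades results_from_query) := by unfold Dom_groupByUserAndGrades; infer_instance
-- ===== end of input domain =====

-- B groups the full rows per user in one dict first, then derives the data and
-- grades dicts from that grouping in a second pass (alternative decomposition;
-- same cost). Return-value equivalence; neither version mutates its argument.

-- ===== PORT A =====
-- one iteration of A's loop over (data_user_base, grades_user_base); entry[0] is
-- pyGetD (in range under Pre_), dict writes/appends are insert (overwrite keeps position)
def pvStepA (st : PySem.Dict String (List (List String)) × PySem.Dict String (List String))
    (entry : List String) :
    PySem.Dict String (List (List String)) × PySem.Dict String (List String) :=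
  let key := PySem.List.pyGetD entry 0 ""
  if st.1.contains key then
    let templist := PySem.List.slice entry (some 1) (some (-2))
    (st.1.insert key (st.1.getD key [] ++ [templist]), st.2)
  else
    (st.1.insert key [PySem.List.slice entry (some 1) (some (-2))],
     st.2.insert key (PySem.List.slice entry (some (-2)) none))

def groupByUserAndGrades (results_from_query : List (List String)) : (List (String × List (List String))) × (List (String × List String)) :=
  let st := results_from_query.foldl pvStepA (PySem.Dict.empty, PySem.Dict.empty)
  (st.1.items, st.2.items)

-- ===== PORT B =====
-- groups.setdefault(entry[0], []).append(entry)  =  modify key [] (· ++ [entry])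
def pvStepB (g : PySem.Dict String (List (List String))) (entry : List String) :
    PySem.Dict String (List (List String)) :=
  g.modify (PySem.List.pyGetD entry 0 "") [] (· ++ [entry])

def groupByUserAndGrades_alt (results_from_query : List (List String)) : (List (String × List (List String))) × (List (String × List String)) :=
  let groups := results_from_query.foldl pvStepB PySem.Dict.empty
  (groups.items.map (fun p => (p.1, p.2.map (fun row => PySem.List.slice row (some 1) (some (-2))))),
   groups.items.map (fun p => (p.1, PySem.List.slice (PySem.List.pyGetD p.2 0 []) (some (-2)) none)))

-- ===== PRECONDITION & SPEC =====
-- Pre_ excludes exactly the inputs containing an empty row, on which Python A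
-- raises IndexError at entry[0] (B raises there too).
def Pre_groupByUserAndGrades (results_from_query : List (List String)) : Prop :=
  ∀ e ∈ results_from_query, e ≠ []
instance (results_from_query : List (List String)) : Decidable (Pre_groupByUserAndGrades results_from_query) := by unfold Pre_groupByUserAndGrades; infer_instance

def pvWitness_groupByUserAndGrades : List (List String) :=
  [["u", "a", "g1", "g2"], ["u", "b", "x", "y"], ["v", "c", "g3", "g4"]]

def Spec_groupByUserAndGrades (results_from_query : List (List String)) (out : (List (String × List (List String))) × (List (String × List String))) : Prop := out = groupByUserAndGrades_alt results_from_query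
instance (results_from_query : List (List String)) (out : (List (String × List (List String))) × (List (String × List String))) : Decidable (Spec_groupByUserAndGrades results_from_query out) := by unfold Spec_groupByUserAndGrades; infer_instance

-- ===== CLAIM (what is proved, stated in full; the proofs are below) =====
def Claim_equal_groupByUserAndGrades : Prop := ∀ (results_from_query : List (List String)), Dom_groupByUserAndGrades results_from_query → Pre_groupByUserAndGrades results_from_query → Spec_groupByUserAndGrades results_from_query (groupByUserAndGrades results_from_query)

-- ===== LEMMAS AND PROOFS =====

-- the two per-item transforms B applies to the grouping dict, as dict maps
def pvPhiD (g : PySem.Dict String (List (List String))) : PySem.Dict String (List (List String)) :=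
  PySem.Dict.mk (g.items.map (fun p => (p.1, p.2.map (fun row => PySem.List.slice row (some 1) (some (-2))))))
def pvPhiG (g : PySem.Dict String (List (List String))) : PySem.Dict String (List String) :=
  PySem.Dict.mk (g.items.map (fun p => (p.1, PySem.List.slice (PySem.List.pyGetD p.2 0 []) (some (-2)) none)))

lemma pvKeys_phiD (g : PySem.Dict String (List (List String))) : (pvPhiD g).keys = g.keys := by
  simp [pvPhiD, PySem.Dict.keys, List.map_map, Function.comp]

lemma pvContains_phiD (g : PySem.Dict String (List (List String))) (k : String) :
    (pvPhiD g).contains k = g.contains k := by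
  rw [PySem.Dict.contains_eq_decide_mem_keys, PySem.Dict.contains_eq_decide_mem_keys, pvKeys_phiD]

lemma pvStepB_eq (g : PySem.Dict String (List (List String))) (e : List String) :
    pvStepB g e = g.insert (PySem.List.pyGetD e 0 "") (g.getD (PySem.List.pyGetD e 0 "") [] ++ [e]) := rfl

lemma pvPhiD_items (g : PySem.Dict String (List (List String))) :
    (pvPhiD g).items = g.items.map (fun p => (p.1, p.2.map (fun row => PySem.List.slice row (some 1) (some (-2))))) := rfl

lemma pvPhiG_items (g : PySem.Dict String (List (List String))) :
    (pvPhiG g).items = g.items.map (fun p => (p.1, PySem.List.slice (PySem.List.pyGetD p.2 0 []) (some (-2)) none)) := rfl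

lemma pvStep_comm (g : PySem.Dict String (List (List String))) (e : List String)
    (hnd : g.keys.Nodup) (hne : ∀ p ∈ g.items, p.2 ≠ []) :
    pvStepA (pvPhiD g, pvPhiG g) e = (pvPhiD (pvStepB g e), pvPhiG (pvStepB g e)) := by
  rw [pvStepB_eq]
  set k := PySem.List.pyGetD e 0 "" with hk
  by_cases hc : g.contains k = true
  · -- key already present
    obtain ⟨rows, hrows⟩ : ∃ rows, g.get? k = some rows := by
      have := PySem.Dict.contains_eq_isSome_get? (d := g) (k := k)
      rw [hc] at this
      exact Option.isSome_iff_exists.mp this.symm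
    have hmem : (k, rows) ∈ g.items := PySem.Dict.mem_items_of_get?_eq_some _ hrows
    have hrne : rows ≠ [] := hne _ hmem
    have hgd : g.getD k [] = rows := PySem.Dict.getD_of_get?_eq_some g [] hrows
    have hmemD : (k, rows.map (fun row => PySem.List.slice row (some 1) (some (-2)))) ∈ (pvPhiD g).items :=
      List.mem_map_of_mem hmem
    have hndD : (pvPhiD g).keys.Nodup := by rw [pvKeys_phiD]; exact hnd
    have hgdD : (pvPhiD g).getD k [] = rows.map (fun row => PySem.List.slice row (some 1) (some (-2))) :=
      PySem.Dict.getD_of_mem_items _ hmemD hndD []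
    have hcD : (pvPhiD g).contains k = true := by rw [pvContains_phiD]; exact hc
    have hDeq : (pvPhiD g).insert k
        (rows.map (fun row => PySem.List.slice row (some 1) (some (-2))) ++ [PySem.List.slice e (some 1) (some (-2))])
        = pvPhiD (g.insert k (rows ++ [e])) := by
      apply PySem.Dict.ext
      rw [PySem.Dict.items_insert_of_contains _ _ hcD, pvPhiD_items, pvPhiD_items,
        PySem.Dict.items_insert_of_contains _ _ hc, List.map_map, List.map_map]
      apply List.map_congr_left
      intro p hp
      cases hpk : p.1 == k <;> simp [Function.comp, hpk, List.map_append]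
    have hGeq : pvPhiG g = pvPhiG (g.insert k (rows ++ [e])) := by
      apply PySem.Dict.ext
      rw [pvPhiG_items, pvPhiG_items, PySem.Dict.items_insert_of_contains _ _ hc, List.map_map]
      apply List.map_congr_left
      intro p hp
      cases hpk : p.1 == k
      · simp [Function.comp, hpk]
      · have hp1 : p.1 = k := eq_of_beq hpk
        have hp2 : p.2 = rows := by
          have := PySem.Dict.get?_of_mem_items _ (by exact hp : (p.1, p.2) ∈ g.items) hnd
          rw [hp1, hrows] at this
          exact (Option.some.injEq _ _).mp this.symm
        obtain ⟨r, rs, hr⟩ : ∃ r rs, rows = r :: rs := by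
          cases rows with
          | nil => exact absurd rfl hrne
          | cons r rs => exact ⟨r, rs, rfl⟩
        simp [Function.comp, hp1, hp2, hr, PySem.List.pyGetD_zero]
    simp only [pvStepA, ← hk, hcD, if_pos, hgdD, hgd]
    exact Prod.ext hDeq hGeq
  · -- new key
    have hcF : g.contains k = false := by simpa using hc
    have hgd : g.getD k [] = [] := PySem.Dict.getD_of_not_contains g [] hcF
    have hcD : (pvPhiD g).contains k = false := by rw [pvContains_phiD]; exact hcF
    have hcG : (pvPhiG g).contains k = false := by
      rw [PySem.Dict.contains_eq_decide_mem_keys]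
      have : (pvPhiG g).keys = g.keys := by
        simp [pvPhiG, PySem.Dict.keys, List.map_map, Function.comp]
      rw [this, ← PySem.Dict.contains_eq_decide_mem_keys]
      exact hcF
    have hDeq : (pvPhiD g).insert k [PySem.List.slice e (some 1) (some (-2))] = pvPhiD (g.insert k [e]) := by
      apply PySem.Dict.ext
      rw [PySem.Dict.items_insert_of_not_contains _ _ hcD, pvPhiD_items, pvPhiD_items,
        PySem.Dict.items_insert_of_not_contains _ _ hcF, List.map_append]
      rfl
    have hGeq : (pvPhiG g).insert k (PySem.List.slice e (some (-2)) none) = pvPhiG (g.insert k [e]) := by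
      apply PySem.Dict.ext
      rw [PySem.Dict.items_insert_of_not_contains _ _ hcG, pvPhiG_items, pvPhiG_items,
        PySem.Dict.items_insert_of_not_contains _ _ hcF, List.map_append]
      simp [PySem.List.pyGetD_zero]
    simp only [pvStepA, ← hk, hcD, Bool.false_eq_true, if_false, hgd, List.nil_append]
    exact Prod.ext hDeq hGeq

lemma pvNodup_stepB (g : PySem.Dict String (List (List String))) (e : List String)
    (hnd : g.keys.Nodup) : (pvStepB g e).keys.Nodup := by
  rw [pvStepB_eq]; exact PySem.Dict.nodup_keys_insert _ _ _ hnd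

lemma pvNe_stepB (g : PySem.Dict String (List (List String))) (e : List String)
    (hne : ∀ p ∈ g.items, p.2 ≠ []) : ∀ p ∈ (pvStepB g e).items, p.2 ≠ [] := by
  intro p hp
  rw [pvStepB_eq] at hp
  rcases (PySem.Dict.mem_items_insert _ _ _ _).mp hp with h | ⟨h, _⟩
  · subst h; simp
  · exact hne _ h

lemma pvMain (l : List (List String)) :
    ∀ (g : PySem.Dict String (List (List String))), g.keys.Nodup → (∀ p ∈ g.items, p.2 ≠ []) →
      l.foldl pvStepA (pvPhiD g, pvPhiG g) = (pvPhiD (l.foldl pvStepB g), pvPhiG (l.foldl pvStepB g)) := by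
  induction l with
  | nil => intro g _ _; rfl
  | cons e rest ih =>
    intro g hnd hne
    simp only [List.foldl_cons]
    rw [pvStep_comm g e hnd hne]
    exact ih (pvStepB g e) (pvNodup_stepB g e hnd) (pvNe_stepB g e hne)

-- ===== VERDICT (by name: the statement is the Claim_ definition above) =====
theorem groupByUserAndGrades_spec : Claim_equal_groupByUserAndGrades := by
  intro l _ _
  unfold Spec_groupByUserAndGrades groupByUserAndGrades groupByUserAndGrades_alt
  have h := pvMain l PySem.Dict.empty (by simp [PySem.Dict.keys]; exact List.nodup_nil) (by intro p hp; simp [PySem.Dict.empty] at hp)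
  have hD : pvPhiD PySem.Dict.empty = PySem.Dict.empty := rfl
  have hG : pvPhiG PySem.Dict.empty = PySem.Dict.empty := rfl
  rw [hD, hG] at h
  simp only [h]
  rfl
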